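-- pv_equiv track=rewrite | github.com/bartvanbossuyt/pySTREAMS | test_inverse.py | positions_to_valuelist
-- ===== SOURCE A (Python) =====
-- def positions_to_valuelist(positions, axis='x'):
--     n = len(positions)
--     ai = 0 if axis == 'x' else 1
--     mat = [[None]*n for _ in range(n)]
--     for i in range(n):
--         for j in range(n):
--             if i == j:
--                 mat[i][j] = None
--             else:
--                 a = positions[i][ai]
--                 b = positions[j][ai]
--                 mat[i][j] = 1 if a < b else -1 if a > b else 0
--     return mat
-- ===== SOURCE B (Python) =====
-- def positions_to_valuelist(positions, axis='x'):
--     ai = 0 if axis == 'x' else 1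
--     vals = [p[ai] for p in positions]
--     # dense rank of each distinct coordinate value via one sort
--     uniq = sorted(set(vals))
--     rank = {v: r for r, v in enumerate(uniq)}
--     # one shared comparison row per rank: entry j = sign(rank[vals[j]] - r)
--     templates = [[(rank[v] > r) - (rank[v] < r) for v in vals] for r in range(len(uniq))]
--     mat = []
--     for i, v in enumerate(vals):
--         row = list(templates[rank[v]])
--         row[i] = None
--         mat.append(row)
--     return mat
-- ===== Notes on version B (the rewrite author's own statement) =====
-- stated objective: alternative
-- what changed: B sorts the distinct coordinate values once into dense ranks, precomputes one shared sign-row template per rank, and builds each row by copying its rank's template and blanking the diagonal, instead of comparing every ordered pair of positions directly.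
import Mathlib
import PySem

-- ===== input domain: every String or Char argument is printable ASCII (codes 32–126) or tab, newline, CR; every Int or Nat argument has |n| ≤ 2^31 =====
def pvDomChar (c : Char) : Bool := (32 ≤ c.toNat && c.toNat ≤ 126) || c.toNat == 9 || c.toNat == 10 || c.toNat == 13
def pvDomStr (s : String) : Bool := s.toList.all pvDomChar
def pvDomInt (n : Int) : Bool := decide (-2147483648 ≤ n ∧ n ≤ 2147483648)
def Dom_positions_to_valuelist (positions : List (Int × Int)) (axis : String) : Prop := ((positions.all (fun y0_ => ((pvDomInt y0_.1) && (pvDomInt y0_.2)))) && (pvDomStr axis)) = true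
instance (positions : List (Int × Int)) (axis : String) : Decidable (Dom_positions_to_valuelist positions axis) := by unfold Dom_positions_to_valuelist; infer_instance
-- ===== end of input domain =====

-- B ranks the distinct coordinate values by one sort and builds each row from a shared per-rank sign template (alternative decomposition).

-- ===== PORT A =====
-- positions[i][ai]: ai ∈ {0,1}, project the pair accordingly
def pvProj (ai : Int) (p : Int × Int) : Int := if ai = 0 then p.1 else p.2

-- A initialises an n×n matrix of None and then overwrites every cell in row-major
-- order; ported as the row-major construction of the same cells. Indices i, j come
-- from range(n), hence are in range, so pyGetD is exact for positions[i].
def positions_to_valuelist (positions : List (Int × Int)) (axis : String) : List (List (Option Int)) :=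
  let n : Int := positions.length
  let ai : Int := if axis == "x" then 0 else 1
  (PySem.List.pyRange 0 n 1).map (fun i =>
    (PySem.List.pyRange 0 n 1).map (fun j =>
      if i == j then (none : Option Int)
      else
        let a := pvProj ai (PySem.List.pyGetD positions i (0, 0))
        let b := pvProj ai (PySem.List.pyGetD positions j (0, 0))
        some (if a < b then 1 else if a > b then -1 else 0)))

-- ===== PORT B =====
-- rank[v] in Source B always hits (every v of vals is a key), so getD's default is never read.
-- row[i] = None on the int row is ported by mapping the template through some and setting cell i to none;
-- i comes from enumerate(vals), hence 0 ≤ i, so .toNat is exact.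
def positions_to_valuelist_alt (positions : List (Int × Int)) (axis : String) : List (List (Option Int)) :=
  let ai : Int := if axis == "x" then 0 else 1
  let vals := positions.map (pvProj ai)
  let uniq := PySem.List.sorted (PySem.Set.ofList vals) (fun x => x) false
  let rank : PySem.Dict Int Int :=
    (PySem.List.enumerate uniq 0).foldl (fun d rv => d.insert rv.2 rv.1) PySem.Dict.empty
  let templates := (List.range uniq.length).map (fun (r : Nat) =>
    vals.map (fun v =>
      (if rank.getD v 0 > (r : Int) then (1 : Int) else 0) -
      (if rank.getD v 0 < (r : Int) then 1 else 0)))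
  (PySem.List.enumerate vals 0).foldl (fun mat iv =>
    mat ++ [((PySem.List.pyGetD templates (rank.getD iv.2 0) []).map some).set iv.1.toNat
      (none : Option Int)]) []

-- ===== PRECONDITION & SPEC =====
def Spec_positions_to_valuelist (positions : List (Int × Int)) (axis : String) (out : List (List (Option Int))) : Prop := out = positions_to_valuelist_alt positions axis
instance (positions : List (Int × Int)) (axis : String) (out : List (List (Option Int))) : Decidable (Spec_positions_to_valuelist positions axis out) := by unfold Spec_positions_to_valuelist; infer_instance

-- ===== CLAIM (what is proved, stated in full; the proofs are below) =====
def Claim_equal_positions_to_valuelist : Prop := ∀ (positions : List (Int × Int)) (axis : String), Dom_positions_to_valuelist positions axis → Spec_positions_to_valuelist positions axis (positions_to_valuelist positions axis)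

-- ===== LEMMAS AND PROOFS =====

-- A in closed row-major form over Nat indices
theorem pvA_eq (positions : List (Int × Int)) (axis : String) :
    positions_to_valuelist positions axis =
      (List.range positions.length).map (fun i => (List.range positions.length).map (fun j =>
        if i = j then (none : Option Int)
        else
          let a := pvProj (if axis == "x" then 0 else 1) (positions.getD i (0, 0))
          let b := pvProj (if axis == "x" then 0 else 1) (positions.getD j (0, 0))
          some (if a < b then 1 else if a > b then -1 else 0))) := by
  unfold positions_to_valuelist
  simp only [PySem.List.pyRange_one, Int.sub_zero, Int.toNat_natCast, List.map_map]
  apply List.map_congr_left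
  intro i hi
  apply List.map_congr_left
  intro j hj
  simp only [Function.comp, Int.zero_add]
  rw [List.mem_range] at hi hj
  rw [PySem.List.pyGetD_natCast, PySem.List.pyGetD_natCast]
  by_cases h : i = j
  · subst h; simp
  · have hb : ((i : Int) == (j : Int)) = false := by
      simp only [beq_eq_false_iff_ne, ne_eq, Int.natCast_inj]
      exact h
    simp [h, hb]

-- the rank-building loop: with distinct keys, looking up v yields start + index of v
theorem pvRank_get (us : List Int) (hnd : us.Nodup) :
    ∀ (s : Int) (d : PySem.Dict Int Int) (v : Int),
      ((PySem.List.enumerate us s).foldl (fun d rv => d.insert rv.2 rv.1) d).get? v =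
        if v ∈ us then some (s + (us.idxOf v : Int)) else d.get? v := by
  induction us with
  | nil => intro s d v; simp [PySem.List.enumerate_nil]
  | cons x us ih =>
    intro s d v
    obtain ⟨hx, hnd'⟩ := List.nodup_cons.mp hnd
    rw [PySem.List.enumerate_cons, List.foldl_cons, ih hnd']
    show (if v ∈ us then some (s + 1 + (us.idxOf v : Int)) else (d.insert x s).get? v) = _
    by_cases hvx : v = x
    · subst hvx
      rw [if_neg hx, if_pos List.mem_cons_self, PySem.Dict.get?_insert_self, List.idxOf_cons_self]
      simp
    · rw [List.idxOf_cons_ne _ (fun h => hvx h.symm)]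
      by_cases hv : v ∈ us
      · rw [if_pos hv, if_pos (List.mem_cons_of_mem _ hv)]
        congr 1
        push_cast
        ring
      · rw [if_neg hv, if_neg (by simp [hvx, hv]), PySem.Dict.get?_insert_of_ne (hne := hvx)]

theorem pvIdx_inj {l : List Int} {v w : Int} (hv : v ∈ l) (hw : w ∈ l)
    (h : l.idxOf v = l.idxOf w) : v = w := by
  have hvl := List.idxOf_lt_length_of_mem hv
  have hgv : l[l.idxOf v] = v := List.getElem_idxOf hvl
  have hgw : l[l.idxOf w] = w := List.getElem_idxOf (List.idxOf_lt_length_of_mem hw)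
  have h2 : l[l.idxOf w] = v := by simpa [h] using hgv
  rw [← h2, hgw]

-- in a strictly increasing list, index order is value order
theorem pvIdx_lt_iff {l : List Int} (hp : l.Pairwise (· < ·)) {v w : Int}
    (hv : v ∈ l) (hw : w ∈ l) : v < w ↔ l.idxOf v < l.idxOf w := by
  have hvl := List.idxOf_lt_length_of_mem hv
  have hwl := List.idxOf_lt_length_of_mem hw
  have hgv : l[l.idxOf v] = v := List.getElem_idxOf hvl
  have hgw : l[l.idxOf w] = w := List.getElem_idxOf hwl
  have hmono : ∀ p q (hp' : p < l.length) (hq : q < l.length), p < q → l[p] < l[q] :=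
    fun p q hp' hq hpq => (List.pairwise_iff_getElem.mp hp) p q hp' hq hpq
  constructor
  · intro hlt
    rcases Nat.lt_trichotomy (l.idxOf v) (l.idxOf w) with h | h | h
    · exact h
    · exfalso; have := pvIdx_inj hv hw h; omega
    · exfalso
      have := hmono _ _ hwl hvl h
      rw [hgv, hgw] at this
      omega
  · intro h
    have := hmono _ _ hvl hwl h
    rwa [hgv, hgw] at this

-- ===== VERDICT (by name: the statement is the Claim_ definition above) =====
theorem positions_to_valuelist_spec : Claim_equal_positions_to_valuelist := by
  intro positions axis _
  show positions_to_valuelist positions axis = positions_to_valuelist_alt positions axis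
  set ai : Int := if axis == "x" then 0 else 1 with hai
  set vals := positions.map (pvProj ai) with hvals
  set uniq := PySem.List.sorted (PySem.Set.ofList vals) (fun x => x) false with huniq
  set rank : PySem.Dict Int Int :=
    (PySem.List.enumerate uniq 0).foldl (fun d rv => d.insert rv.2 rv.1) PySem.Dict.empty with hrank
  set templates := (List.range uniq.length).map (fun (r : Nat) =>
    vals.map (fun v =>
      (if rank.getD v 0 > (r : Int) then (1 : Int) else 0) -
      (if rank.getD v 0 < (r : Int) then 1 else 0))) with htemplates
  have hnd : uniq.Nodup :=
    (PySem.List.sorted_perm _ _ _).nodup_iff.mpr (PySem.Set.nodup_ofList vals)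
  have hpw : uniq.Pairwise (· < ·) := PySem.List.sorted_ofList_pairwise_lt vals
  have hmemu : ∀ v, v ∈ vals → v ∈ uniq := by
    intro v hv
    rw [huniq, PySem.List.mem_sorted, PySem.Set.mem_ofList]
    exact hv
  -- rank lookup = index in uniq
  have hrk : ∀ v ∈ vals, rank.getD v 0 = (uniq.idxOf v : Int) := by
    intro v hv
    rw [hrank, PySem.Dict.getD_eq_get?_getD, pvRank_get uniq hnd 0 _ v,
      if_pos (hmemu v hv)]
    simp
  -- the comparison of ranks is the comparison of values
  have hsign : ∀ v ∈ vals, ∀ w ∈ vals,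
      (if rank.getD w 0 > rank.getD v 0 then (1 : Int) else 0) -
        (if rank.getD w 0 < rank.getD v 0 then 1 else 0) =
      (if v < w then (1 : Int) else if v > w then -1 else 0) := by
    intro v hv w hw
    rw [hrk v hv, hrk w hw]
    have h1 : v < w ↔ (uniq.idxOf v : Int) < (uniq.idxOf w : Int) := by
      rw [pvIdx_lt_iff hpw (hmemu v hv) (hmemu w hw)]
      exact (Nat.cast_lt).symm
    have h2 : w < v ↔ (uniq.idxOf w : Int) < (uniq.idxOf v : Int) := by
      rw [pvIdx_lt_iff hpw (hmemu w hw) (hmemu v hv)]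
      exact (Nat.cast_lt).symm
    split_ifs <;> omega
  -- lengths
  have hvlen : vals.length = positions.length := by rw [hvals, List.length_map]
  -- B as a map over enumerate
  have hB : positions_to_valuelist_alt positions axis =
      (PySem.List.enumerate vals 0).map (fun iv =>
        ((PySem.List.pyGetD templates (rank.getD iv.2 0) []).map some).set iv.1.toNat
          (none : Option Int)) := by
    simp only [positions_to_valuelist_alt, PySem.List.foldl_append_singleton_eq_map,
      List.nil_append]
    rfl
  rw [pvA_eq, hB]
  apply List.ext_getElem
  · simp [PySem.List.length_enumerate, hvlen]
  intro i hi1 hi2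
  rw [List.length_map, List.length_range] at hi1
  have hiv : i < vals.length := by omega
  rw [List.getElem_map, List.getElem_range, List.getElem_map, PySem.List.getElem_enumerate]
  simp only [Int.zero_add, Int.toNat_natCast]
  -- identify the chosen template row
  have hvm : vals[i] ∈ vals := List.getElem_mem hiv
  have hidxlt : uniq.idxOf vals[i] < uniq.length := List.idxOf_lt_length_of_mem (hmemu _ hvm)
  have hrow : PySem.List.pyGetD templates (rank.getD vals[i] 0) [] =
      vals.map (fun v =>
        (if rank.getD v 0 > rank.getD vals[i] 0 then (1 : Int) else 0) -
        (if rank.getD v 0 < rank.getD vals[i] 0 then 1 else 0)) := by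
    rw [hrk _ hvm, PySem.List.pyGetD_natCast, htemplates]
    rw [List.getD_eq_getElem _ _ (by simpa using hidxlt), List.getElem_map, List.getElem_range]
  rw [hrow]
  apply List.ext_getElem
  · simp [hvlen]
  intro j hj1 hj2
  rw [List.length_map, List.length_range] at hj1
  have hjv : j < vals.length := by omega
  rw [List.getElem_map, List.getElem_range, List.getElem_set, List.getElem_map, List.getElem_map,
    List.getElem_map]
  have hvj : ∀ k (hk : k < vals.length),
      vals[k] = pvProj ai (positions.getD k (0, 0)) := by
    intro k hk
    simp only [hvals, List.getElem_map]
    rw [List.getD_eq_getElem _ _ (by rw [hvals, List.length_map] at hk; omega)]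
  by_cases hij : i = j
  · subst hij
    rw [if_pos rfl, if_pos rfl]
  · rw [if_neg hij, if_neg hij]
    have hj' : pvProj ai positions[j] = vals[j] := by
      simp [hvals, List.getElem_map]
    rw [hj', hsign vals[i] hvm vals[j] (List.getElem_mem hjv), hvj i hiv, hvj j hjv]
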